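-- pv_equiv track=rewrite | github.com/jacob-hansen/Instructify | instructify/process_results.py | count_conversation_stats
-- ===== SOURCE A (Python) =====
-- def count_conversation_stats(results):
--     """Count various statistics about the conversations"""
--     conv_count = 0
--     turn_count = 0
--     image_count = 0
--
--     for key in results:
--         if len(results[key]) == 0:
--             continue
--         image_count += 1
--         for turn in results[key][0]:
--             if isinstance(turn, dict) and 'output' in turn:
--                 turn_count += len(turn['output'])
--                 conv_count += 1
--
--     return {
--         "image_count": image_count,
--         "conv_count": conv_count,
--         "turn_count": turn_count
--     }
-- ===== SOURCE B (Python) =====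
-- def count_conversation_stats(results):
--     """Count various statistics about the conversations"""
--     # divide-and-conquer tree reduction over the commutative monoid of stat triples
--
--     def turn_reduce(ts):
--         # (conv_count, turn_count) for a slice of turns, by recursive halving
--         if len(ts) == 0:
--             return (0, 0)
--         if len(ts) == 1:
--             t = ts[0]
--             if isinstance(t, dict) and 'output' in t:
--                 return (1, len(t['output']))
--             return (0, 0)
--         mid = len(ts) // 2
--         a = turn_reduce(ts[:mid])
--         b = turn_reduce(ts[mid:])
--         return (a[0] + b[0], a[1] + b[1])
--
--     def reduce(items):
--         # (image_count, conv_count, turn_count) for a slice of dict items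
--         if len(items) == 0:
--             return (0, 0, 0)
--         if len(items) == 1:
--             value = items[0][1]
--             if len(value) == 0:
--                 return (0, 0, 0)
--             c, t = turn_reduce(value[0])
--             return (1, c, t)
--         mid = len(items) // 2
--         a = reduce(items[:mid])
--         b = reduce(items[mid:])
--         return (a[0] + b[0], a[1] + b[1], a[2] + b[2])
--
--     image_count, conv_count, turn_count = reduce(list(results.items()))
--     return {
--         "image_count": image_count,
--         "conv_count": conv_count,
--         "turn_count": turn_count
--     }
-- ===== Notes on version B (the rewrite author's own statement) =====
-- stated objective: alternative
-- what changed: Replaces A's single left-to-right accumulating loop (three mutating counters with a nested turn loop) by a divide-and-conquer tree reduction: the item list (and each turn list) is recursively split in half and the per-half stat triples are combined component-wise, exploiting that the stats form a commutative monoid.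
import Mathlib
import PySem

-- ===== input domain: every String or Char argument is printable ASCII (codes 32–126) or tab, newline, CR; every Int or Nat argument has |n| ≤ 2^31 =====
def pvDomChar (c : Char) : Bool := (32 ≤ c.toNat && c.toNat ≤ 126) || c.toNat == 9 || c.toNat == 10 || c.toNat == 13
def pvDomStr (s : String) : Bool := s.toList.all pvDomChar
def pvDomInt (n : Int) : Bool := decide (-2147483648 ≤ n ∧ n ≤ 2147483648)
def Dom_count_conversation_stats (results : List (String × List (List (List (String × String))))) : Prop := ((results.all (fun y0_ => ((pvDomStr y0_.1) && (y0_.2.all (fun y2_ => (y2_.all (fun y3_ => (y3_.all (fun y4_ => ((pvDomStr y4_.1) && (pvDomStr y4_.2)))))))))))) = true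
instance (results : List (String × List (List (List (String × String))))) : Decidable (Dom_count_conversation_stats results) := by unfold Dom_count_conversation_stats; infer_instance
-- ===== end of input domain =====

-- B replaces A's single left-to-right accumulating loop by a divide-and-conquer tree
-- reduction (recursive halving, component-wise combine of stat triples); alternative
-- decomposition, not claimed faster.

-- ===== PORT A =====
-- A: one fold over the dict's entries maintaining (image_count, conv_count, turn_count);
-- the len(results[key])==0 guard skips an entry, then the inner loop over results[key][0]
-- updates turn_count and conv_count for each turn containing 'output' (isinstance(turn, dict)
-- is always true under the declared type).  results[key][0] is in range thanks to the guard,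
-- so (pyGet? _ 0).getD [] is exact.
def count_conversation_stats (results : List (String × List (List (List (String × String))))) : List (String × Int) :=
  let d := PySem.Dict.ofList results
  let acc := d.items.foldl
    (fun (acc : Int × Int × Int) kv =>
      if kv.2.length == 0 then acc
      else
        let acc1 : Int × Int × Int := (acc.1 + 1, acc.2.1, acc.2.2)
        ((PySem.List.pyGet? kv.2 0).getD []).foldl
          (fun (a : Int × Int × Int) turn =>
            if (PySem.Dict.ofList turn).contains "output" then
              (a.1, a.2.1 + 1, a.2.2 + PySem.Str.len ((PySem.Dict.ofList turn).getD "output" ""))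
            else a)
          acc1)
    ((0 : Int), (0 : Int), (0 : Int))
  -- the returned dict literal has three distinct literal keys, so its items are exactly this list
  [("image_count", acc.1), ("conv_count", acc.2.1), ("turn_count", acc.2.2)]

-- ===== PORT B =====
-- B helper turn_reduce: (conv_count, turn_count) over a turn slice by recursive halving
def pvTurnReduce (ts : List (List (String × String))) : Int × Int :=
  if _h0 : ts.length = 0 then (0, 0)
  else if _h1 : ts.length = 1 then
    match ts with
    | t :: _ =>
      if (PySem.Dict.ofList t).contains "output" then
        (1, PySem.Str.len ((PySem.Dict.ofList t).getD "output" ""))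
      else (0, 0)
    | [] => (0, 0)
  else
    let mid := ts.length / 2
    let a := pvTurnReduce (ts.take mid)
    let b := pvTurnReduce (ts.drop mid)
    (a.1 + b.1, a.2 + b.2)
termination_by ts.length
decreasing_by
  · simp only [List.length_take]; omega
  · simp only [List.length_drop]; omega

-- B helper reduce: (image_count, conv_count, turn_count) over an item slice by recursive halving
def pvItemReduce (items : List (String × List (List (List (String × String))))) : Int × Int × Int :=
  if _h0 : items.length = 0 then (0, 0, 0)
  else if _h1 : items.length = 1 then
    match items with
    | kv :: _ =>
      if kv.2.length == 0 then (0, 0, 0)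
      else
        let ct := pvTurnReduce ((PySem.List.pyGet? kv.2 0).getD [])
        (1, ct.1, ct.2)
    | [] => (0, 0, 0)
  else
    let mid := items.length / 2
    let a := pvItemReduce (items.take mid)
    let b := pvItemReduce (items.drop mid)
    (a.1 + b.1, a.2.1 + b.2.1, a.2.2 + b.2.2)
termination_by items.length
decreasing_by
  · simp only [List.length_take]; omega
  · simp only [List.length_drop]; omega

def count_conversation_stats_alt (results : List (String × List (List (List (String × String))))) : List (String × Int) :=
  let s := pvItemReduce (PySem.Dict.ofList results).items
  [("image_count", s.1), ("conv_count", s.2.1), ("turn_count", s.2.2)]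

-- ===== PRECONDITION & SPEC =====
def Spec_count_conversation_stats (results : List (String × List (List (List (String × String))))) (out : List (String × Int)) : Prop := out = count_conversation_stats_alt results
instance (results : List (String × List (List (List (String × String))))) (out : List (String × Int)) : Decidable (Spec_count_conversation_stats results out) := by unfold Spec_count_conversation_stats; infer_instance

-- ===== CLAIM (what is proved, stated in full; the proofs are below) =====
def Claim_equal_count_conversation_stats : Prop := ∀ (results : List (String × List (List (List (String × String))))), Dom_count_conversation_stats results → Spec_count_conversation_stats results (count_conversation_stats results)

-- ===== LEMMAS AND PROOFS =====

-- proof-side abbreviations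
def pvP (turn : List (String × String)) : Bool := (PySem.Dict.ofList turn).contains "output"
def pvG (turn : List (String × String)) : Int := PySem.Str.len ((PySem.Dict.ofList turn).getD "output" "")
def pvFirst (v : List (List (List (String × String)))) : List (List (String × String)) :=
  (PySem.List.pyGet? v 0).getD []

-- closed form for the turn-level stats of a slice
def pvSpecT (ts : List (List (String × String))) : Int × Int :=
  (((ts.filter pvP).length : Int), ((ts.filter pvP).map pvG).sum)

-- closed form for the item-level stats of a slice
def pvSpecI (l : List (String × List (List (List (String × String))))) : Int × Int × Int :=
  ((((l.map (·.2)).filter (fun v => !(v.length == 0))).length : Int),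
   ((((l.map (·.2)).filter (fun v => !(v.length == 0))).flatMap
      (fun v => (pvFirst v).filter pvP)).length : Int),
   ((((l.map (·.2)).filter (fun v => !(v.length == 0))).flatMap
      (fun v => (pvFirst v).filter pvP)).map pvG).sum)

lemma pvSpecT_append (a b : List (List (String × String))) :
    pvSpecT (a ++ b) = ((pvSpecT a).1 + (pvSpecT b).1, (pvSpecT a).2 + (pvSpecT b).2) := by
  simp [pvSpecT]

lemma pvSpecI_append (a b : List (String × List (List (List (String × String))))) :
    pvSpecI (a ++ b) = ((pvSpecI a).1 + (pvSpecI b).1,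
      (pvSpecI a).2.1 + (pvSpecI b).2.1, (pvSpecI a).2.2 + (pvSpecI b).2.2) := by
  simp [pvSpecI]

-- B's turn-level divide and conquer computes the closed form
lemma pvTurnReduce_eq (ts : List (List (String × String))) : pvTurnReduce ts = pvSpecT ts := by
  induction ts using pvTurnReduce.induct with
  | case1 ts h =>
    match ts, h with | [], _ => simp [pvTurnReduce, pvSpecT]
  | case2 t tail h0 h1 hc _ _ =>
    have ht : tail = [] := by simpa using h1
    subst ht
    simp [pvTurnReduce, pvSpecT, pvP, pvG, hc, List.filter]
  | case3 t tail h0 h1 hc _ _ =>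
    have ht : tail = [] := by simpa using h1
    subst ht
    simp [pvTurnReduce, pvSpecT, pvP, hc, List.filter]
  | case4 h0 h1 h2 h3 => simp at h1
  | case5 ts h0 h1 mid iha ihb =>
    rw [pvTurnReduce]
    simp only [h0, h1, dite_false]
    rw [iha, ihb]
    conv_rhs => rw [← List.take_append_drop (ts.length / 2) ts]
    rw [pvSpecT_append]

-- B's item-level divide and conquer computes the closed form
lemma pvItemReduce_eq (l : List (String × List (List (List (String × String))))) :
    pvItemReduce l = pvSpecI l := by
  induction l using pvItemReduce.induct with
  | case1 l h =>
    match l, h with | [], _ => simp [pvItemReduce, pvSpecI]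
  | case2 kv tail h0 h1 he _ _ =>
    have ht : tail = [] := by simpa using h1
    subst ht
    simp [pvItemReduce, pvSpecI, he]
  | case3 kv tail h0 h1 he _ _ =>
    have ht : tail = [] := by simpa using h1
    subst ht
    rw [pvItemReduce]
    simp [he, pvTurnReduce_eq, pvSpecT, pvSpecI, pvFirst]
  | case4 h0 h1 h2 h3 => simp at h1
  | case5 l h0 h1 mid iha ihb =>
    rw [pvItemReduce]
    simp only [h0, h1, dite_false]
    rw [iha, ihb]
    conv_rhs => rw [← List.take_append_drop (l.length / 2) l]
    rw [pvSpecI_append]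

-- the inner loop of A over the turns of one entry
lemma pv_inner (ts : List (List (String × String))) (a : Int × Int × Int) :
    ts.foldl
      (fun (a : Int × Int × Int) turn =>
        if (PySem.Dict.ofList turn).contains "output" then
          (a.1, a.2.1 + 1, a.2.2 + PySem.Str.len ((PySem.Dict.ofList turn).getD "output" ""))
        else a) a
    = (a.1, a.2.1 + ((ts.filter pvP).length : Int), a.2.2 + ((ts.filter pvP).map pvG).sum) := by
  induction ts generalizing a with
  | nil => simp
  | cons t ts ih =>
    by_cases h : pvP t = true
    · simp [List.foldl_cons, List.filter_cons, pvP] at *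
      rw [ih]
      simp [h, pvG]
      constructor <;> ring
    · simp only [Bool.not_eq_true] at h
      simp [List.foldl_cons, List.filter_cons, pvP] at *
      rw [ih]
      simp [h]

-- the outer loop of A
lemma pv_outer (l : List (String × List (List (List (String × String))))) (a : Int × Int × Int) :
    l.foldl
      (fun (acc : Int × Int × Int) kv =>
        if kv.2.length == 0 then acc
        else
          let acc1 : Int × Int × Int := (acc.1 + 1, acc.2.1, acc.2.2)
          ((PySem.List.pyGet? kv.2 0).getD []).foldl
            (fun (a : Int × Int × Int) turn =>
              if (PySem.Dict.ofList turn).contains "output" then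
                (a.1, a.2.1 + 1, a.2.2 + PySem.Str.len ((PySem.Dict.ofList turn).getD "output" ""))
              else a)
            acc1) a
    = (a.1 + (pvSpecI l).1, a.2.1 + (pvSpecI l).2.1, a.2.2 + (pvSpecI l).2.2) := by
  induction l generalizing a with
  | nil => simp [pvSpecI]
  | cons kv l ih =>
    by_cases h : kv.2.length = 0
    · have hb : (kv.2.length == 0) = true := by simp [h]
      simp only [List.foldl_cons, hb, reduceIte]
      rw [ih]
      simp [pvSpecI, h]
    · simp only [List.foldl_cons]
      rw [pv_inner, ih]
      simp [h, pvSpecI, pvFirst]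
      refine ⟨by ring, by ring, by ring⟩

-- ===== VERDICT (by name: the statement is the Claim_ definition above) =====
theorem count_conversation_stats_spec : Claim_equal_count_conversation_stats := by
  intro results _
  unfold Spec_count_conversation_stats count_conversation_stats count_conversation_stats_alt
  simp only [pv_outer, pvItemReduce_eq]
  simp
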